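-- pv_equiv track=rewrite | github.com/Sohail1964140/SDEO_Office_Management_System | Apps/Reports/views.py | getHeading
-- ===== SOURCE A (Python) =====
-- def getHeading(columns: list)->list:
--     heading = list()
--
--     for column in columns:
--
--         match column:
--
--             case 'Accadqualification':
--
--                 heading.append('Accad Qualification')
--
--             case 'Proffqualification':
--                 heading.append('Proff Qualification')
--             case 'teacherFirstAppointment':
--                 heading.append('Year of Recruitment')
--             case 'g_fund_no':
--
--                 heading.append('Govt Fund No')
--
--             case 'personal_no':
--
--                 heading.append('Personal No')
--
--             case 'post':
--                 heading.append('Designation')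
--
--             case 'personal_no':
--
--                 heading.append('Personal No')
--
--             case 'dateOfTakingOverChargeInPresentSchool':
--
--                 heading.append('Date of taking over charge in present school')
--             case 'dateOfTakingOverChargeOnPresentPost':
--
--                 heading.append('Date of taking over charge on present post')
--             case _:
--                 heading.append(column)
--
--     return heading
-- ===== SOURCE B (Python) =====
-- _RULES = [
--     ('Accadqualification', 'Accad Qualification'),
--     ('Proffqualification', 'Proff Qualification'),
--     ('teacherFirstAppointment', 'Year of Recruitment'),
--     ('g_fund_no', 'Govt Fund No'),
--     ('personal_no', 'Personal No'),
--     ('post', 'Designation'),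
--     ('dateOfTakingOverChargeInPresentSchool', 'Date of taking over charge in present school'),
--     ('dateOfTakingOverChargeOnPresentPost', 'Date of taking over charge on present post'),
-- ]
--
--
-- def getHeading(columns: list) -> list:
--     # Staged substitution passes: start from the columns unchanged and apply
--     # each renaming rule to the whole list in turn. Safe because no display
--     # label is itself a rule key, so a substituted label is never rewritten.
--     heading = list(columns)
--     for key, label in _RULES:
--         heading = [label if c == key else c for c in heading]
--     return heading
-- ===== Notes on version B (the rewrite author's own statement) =====
-- stated objective: alternative
-- what changed: Instead of a single pass dispatching each element through a nine-branch match/case ladder, B performs staged whole-list substitution passes: one pass per renaming rule, each rewriting every occurrence of that rule's key; correct because no display label is itself a key.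
import Mathlib
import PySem

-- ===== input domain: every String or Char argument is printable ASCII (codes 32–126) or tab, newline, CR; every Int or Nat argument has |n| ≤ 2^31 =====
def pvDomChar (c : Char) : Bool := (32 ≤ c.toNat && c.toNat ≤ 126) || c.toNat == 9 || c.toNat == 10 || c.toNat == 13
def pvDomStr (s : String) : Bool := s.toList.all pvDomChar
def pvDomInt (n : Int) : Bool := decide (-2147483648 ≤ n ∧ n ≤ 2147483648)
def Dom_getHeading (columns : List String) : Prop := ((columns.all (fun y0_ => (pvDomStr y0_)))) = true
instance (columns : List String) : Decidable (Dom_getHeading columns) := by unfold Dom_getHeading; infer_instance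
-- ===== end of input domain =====

-- B rewrites the list in staged substitution passes (one per renaming rule) instead of
-- dispatching each element through A's match/case ladder; same return value, no side effects.

-- ===== PORT A =====
-- match/case ladder ported as the equivalent ordered if-chain (first matching case wins)
def getHeadingCase (column : String) : String :=
  if "Accadqualification" = column then "Accad Qualification"
  else if "Proffqualification" = column then "Proff Qualification"
  else if "teacherFirstAppointment" = column then "Year of Recruitment"
  else if "g_fund_no" = column then "Govt Fund No"
  else if "personal_no" = column then "Personal No"
  else if "post" = column then "Designation"
  else if "personal_no" = column then "Personal No"  -- duplicate case kept from A (unreachable)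
  else if "dateOfTakingOverChargeInPresentSchool" = column then "Date of taking over charge in present school"
  else if "dateOfTakingOverChargeOnPresentPost" = column then "Date of taking over charge on present post"
  else column

def getHeading (columns : List String) : List String :=
  columns.foldl (fun heading column => heading ++ [getHeadingCase column]) []

-- ===== PORT B =====
def rulesList : List (String × String) := [
  ("Accadqualification", "Accad Qualification"),
  ("Proffqualification", "Proff Qualification"),
  ("teacherFirstAppointment", "Year of Recruitment"),
  ("g_fund_no", "Govt Fund No"),
  ("personal_no", "Personal No"),
  ("post", "Designation"),
  ("dateOfTakingOverChargeInPresentSchool", "Date of taking over charge in present school"),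
  ("dateOfTakingOverChargeOnPresentPost", "Date of taking over charge on present post")]

-- one substitution pass over the whole list (the inner comprehension of Source B)
def substPass (key label : String) (heading : List String) : List String :=
  heading.map (fun c => if c = key then label else c)

def getHeading_alt (columns : List String) : List String :=
  rulesList.foldl (fun heading kl => substPass kl.1 kl.2 heading) columns

-- ===== PRECONDITION & SPEC =====
def Spec_getHeading (columns : List String) (out : List String) : Prop := out = getHeading_alt columns
instance (columns : List String) (out : List String) : Decidable (Spec_getHeading columns out) := by unfold Spec_getHeading; infer_instance

-- ===== CLAIM (what is proved, stated in full; the proofs are below) =====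
def Claim_equal_getHeading : Prop := ∀ (columns : List String), Dom_getHeading columns → Spec_getHeading columns (getHeading columns)

-- ===== LEMMAS AND PROOFS =====
lemma foldl_append_map (f : String → String) (xs : List String) (acc : List String) :
    xs.foldl (fun h c => h ++ [f c]) acc = acc ++ xs.map f := by
  induction xs generalizing acc with
  | nil => simp
  | cons x xs ih => simp [List.foldl, ih]

-- staged list-passes = one pass of the composed per-element substitution
lemma foldl_subst_map (rules : List (String × String)) (xs : List String) :
    rules.foldl (fun heading kl => substPass kl.1 kl.2 heading) xs
      = xs.map (fun c => rules.foldl (fun s kl => if s = kl.1 then kl.2 else s) c) := by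
  induction rules generalizing xs with
  | nil => simp
  | cons r rs ih =>
      simp only [List.foldl]
      rw [ih]
      simp only [substPass, List.map_map]
      rfl

lemma composed_eq_case (c : String) :
    rulesList.foldl (fun s kl => if s = kl.1 then kl.2 else s) c = getHeadingCase c := by
  unfold rulesList
  simp only [List.foldl]
  by_cases h1 : c = "Accadqualification"
  · subst h1; decide
  by_cases h2 : c = "Proffqualification"
  · subst h2; decide
  by_cases h3 : c = "teacherFirstAppointment"
  · subst h3; decide
  by_cases h4 : c = "g_fund_no"
  · subst h4; decide
  by_cases h5 : c = "personal_no"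
  · subst h5; decide
  by_cases h6 : c = "post"
  · subst h6; decide
  by_cases h7 : c = "dateOfTakingOverChargeInPresentSchool"
  · subst h7; decide
  by_cases h8 : c = "dateOfTakingOverChargeOnPresentPost"
  · subst h8; decide
  simp only [if_neg h1, if_neg h2, if_neg h3, if_neg h4, if_neg h5, if_neg h6, if_neg h7, if_neg h8]
  unfold getHeadingCase
  rw [if_neg (fun h => h1 h.symm), if_neg (fun h => h2 h.symm), if_neg (fun h => h3 h.symm),
     if_neg (fun h => h4 h.symm), if_neg (fun h => h5 h.symm), if_neg (fun h => h6 h.symm),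
     if_neg (fun h => h5 h.symm), if_neg (fun h => h7 h.symm), if_neg (fun h => h8 h.symm)]

-- ===== VERDICT (by name: the statement is the Claim_ definition above) =====
theorem getHeading_spec : Claim_equal_getHeading := by
  intro columns _
  unfold Spec_getHeading getHeading getHeading_alt
  rw [foldl_append_map, foldl_subst_map]
  simp [composed_eq_case]
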